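-- pv_equiv track=rewrite | github.com/Terra0305/Algorithm-Archive | 딩코딩코Python/프로그래머스_고득점킷_해시_폰켓몬.py | solution
-- ===== SOURCE A (Python) =====
-- def solution(nums):
--     dict={} #포켓몬을 담을 딕셔너리
--     can_get_num = int(len(nums)/2)#가져갈 수 있는 포켓몬의 수
--     get_count=0 #현재 실제로 가져간 포켓몬의 수
--
--     for current_pocketmon_num in nums:
--         if current_pocketmon_num in dict:
--             dict[current_pocketmon_num]+=1
--         else:
--             dict[current_pocketmon_num]=1
--
--     pocketmon_types = len(dict)
--
--     if pocketmon_types > can_get_num: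
--         answer = can_get_num
--     else:
--         answer = pocketmon_types
--
--
--     return answer
-- ===== SOURCE B (Python) =====
-- def solution(nums):
--     s = sorted(nums)
--     distinct = 0
--     prev = None
--     for x in s:
--         if prev is None or x != prev:
--             distinct += 1
--         prev = x
--     return min(distinct, len(nums) // 2)
-- ===== Notes on version B (the rewrite author's own statement) =====
-- stated objective: alternative
-- what changed: Counts distinct pokemon types by sorting and scanning adjacent pairs with a prev accumulator instead of building a counting dictionary, and returns min(distinct, len//2) directly instead of an if-comparison.
import Mathlib
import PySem

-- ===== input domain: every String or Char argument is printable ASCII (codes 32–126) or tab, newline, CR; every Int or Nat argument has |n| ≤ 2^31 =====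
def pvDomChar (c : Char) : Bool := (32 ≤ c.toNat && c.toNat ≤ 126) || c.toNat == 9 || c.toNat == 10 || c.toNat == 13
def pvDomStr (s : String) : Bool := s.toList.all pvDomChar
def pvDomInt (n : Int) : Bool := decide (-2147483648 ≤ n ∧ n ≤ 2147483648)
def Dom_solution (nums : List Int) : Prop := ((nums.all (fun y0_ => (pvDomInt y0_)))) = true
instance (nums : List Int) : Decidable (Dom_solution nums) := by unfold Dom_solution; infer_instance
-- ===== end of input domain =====

-- B counts distinct values by sorting then scanning adjacent pairs (prev accumulator),
-- instead of A's counting dictionary; same result min(distinct, len//2). Objective: alternative.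


-- ===== PORT A =====
-- int(len(nums)/2) = floor division for the nonnegative length (float division is exact here)
def solutionDictStep (d : PySem.Dict Int Int) (x : Int) : PySem.Dict Int Int :=
  if d.contains x then d.modify x 0 (· + 1) else d.insert x 1

def solution (nums : List Int) : Int :=
  let d := nums.foldl solutionDictStep (PySem.Dict.empty)
  let canGetNum := PySem.Int.floordiv (nums.length : Int) 2
  let pocketmonTypes : Int := (d.size : Int)
  if pocketmonTypes > canGetNum then canGetNum else pocketmonTypes

-- ===== PORT B =====
def solutionAltStep (st : Int × Option Int) (x : Int) : Int × Option Int :=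
  (if st.2 = some x then st.1 else st.1 + 1, some x)

def solution_alt (nums : List Int) : Int :=
  let s := PySem.List.sorted nums (fun x => x) false
  let distinct := (s.foldl solutionAltStep (0, none)).1
  min distinct (PySem.Int.floordiv (nums.length : Int) 2)

-- ===== PRECONDITION & SPEC =====
def Spec_solution (nums : List Int) (out : Int) : Prop := out = solution_alt nums
instance (nums : List Int) (out : Int) : Decidable (Spec_solution nums out) := by unfold Spec_solution; infer_instance

-- ===== CLAIM (what is proved, stated in full; the proofs are below) =====
def Claim_equal_solution : Prop := ∀ (nums : List Int), Dom_solution nums → Spec_solution nums (solution nums)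

-- ===== LEMMAS AND PROOFS =====

-- A's dictionary loop collects exactly the distinct elements as keys
lemma keys_foldA (l : List Int) : ∀ d : PySem.Dict Int Int,
    (l.foldl solutionDictStep d).keys = PySem.Set.update d.keys l := by
  induction l with
  | nil => intro d; simp [PySem.Set.update_nil]
  | cons x l ih =>
    intro d
    rw [List.foldl_cons, ih, PySem.Set.update_cons]
    congr 1
    unfold solutionDictStep
    by_cases h : d.contains x = true
    · rw [if_pos h, PySem.Dict.keys_modify, PySem.Dict.keys_insert_of_contains d _ h,
        PySem.Set.add_of_mem ((PySem.Dict.contains_iff_mem_keys d x).mp h)]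
    · have h' : d.contains x = false := by simpa using h
      rw [if_neg h, PySem.Dict.keys_insert_of_not_contains d _ h',
        PySem.Set.add_of_not_mem]
      intro hm
      exact h ((PySem.Dict.contains_iff_mem_keys d x).mpr hm)

lemma card_insert_eq_card_erase_add_one (x : Int) (s : Finset Int) :
    (insert x s).card = (s.erase x).card + 1 := by
  by_cases h : x ∈ s
  · rw [Finset.insert_eq_self.mpr h, ← Finset.card_erase_add_one h]
  · rw [Finset.erase_eq_of_notMem h, Finset.card_insert_of_notMem h]

lemma set_len_eq_card (l : List Int) : (PySem.Set.ofList l).length = l.toFinset.card := by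
  rw [← List.toFinset_card_of_nodup (PySem.Set.nodup_ofList (xs := l))]
  congr 1
  ext y
  simp [PySem.Set.mem_ofList]

-- a dict's key list and item list have the same length
lemma keys_length_eq_size (d : PySem.Dict Int Int) : d.keys.length = d.size := by
  simp [PySem.Dict.keys, PySem.Dict.size]

lemma sizeA (nums : List Int) :
    (nums.foldl solutionDictStep (PySem.Dict.empty : PySem.Dict Int Int)).size
      = nums.toFinset.card := by
  rw [← keys_length_eq_size, keys_foldA nums (PySem.Dict.empty : PySem.Dict Int Int),
    PySem.Dict.keys_empty, PySem.Set.update_nil_left]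
  exact set_len_eq_card nums

-- B's scan with a 'prev' accumulator counts the distinct elements of a sorted list
lemma scan_go (l : List Int) : ∀ (c p : Int), l.Pairwise (· ≤ ·) → (∀ x ∈ l, p ≤ x) →
    (l.foldl solutionAltStep (c, some p)).1 = c + ((l.toFinset.erase p).card : Int) := by
  induction l with
  | nil => intro c p _ _; simp
  | cons x l ih =>
    intro c p hpw hle
    have hx : p ≤ x := hle x (by simp)
    have hpw' := (List.pairwise_cons.mp hpw).2
    have hxl : ∀ y ∈ l, x ≤ y := (List.pairwise_cons.mp hpw).1
    rw [List.foldl_cons]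
    by_cases hxp : x = p
    · have : solutionAltStep (c, some p) x = (c, some p) := by
        simp [solutionAltStep, hxp]
      rw [this, ih c p hpw' (fun y hy => le_trans hx (hxp ▸ hxl y hy))]
      subst hxp
      rw [List.toFinset_cons, Finset.erase_insert_eq_erase]
    · have hstep : solutionAltStep (c, some p) x = (c + 1, some x) := by
        simp [solutionAltStep, Ne.symm hxp]
      rw [hstep, ih (c + 1) x hpw' hxl]
      have hplt : p < x := lt_of_le_of_ne hx (Ne.symm hxp)
      have hpnot : p ∉ (x :: l).toFinset := by
        simp only [List.toFinset_cons, Finset.mem_insert, List.mem_toFinset]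
        rintro (h | h)
        · exact hxp (h.symm)
        · exact absurd (hxl p h) (not_le.mpr hplt)
      have h1 : (x :: l).toFinset.erase p = insert x l.toFinset := by
        rw [List.toFinset_cons]
        exact Finset.erase_eq_of_notMem (by simpa using hpnot)
      rw [h1, card_insert_eq_card_erase_add_one x l.toFinset]
      push_cast
      ring

lemma distinctB (nums : List Int) :
    ((PySem.List.sorted nums (fun x => x) false).foldl solutionAltStep (0, none)).1
      = (nums.toFinset.card : Int) := by
  have hperm : (PySem.List.sorted nums (fun x => x) false).Perm nums :=
    PySem.List.sorted_perm nums (fun x => x) false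
  have hfin : (PySem.List.sorted nums (fun x => x) false).toFinset = nums.toFinset :=
    List.toFinset_eq_of_perm _ _ hperm
  have hpw : (PySem.List.sorted nums (fun x => x) false).Pairwise (· ≤ ·) := by
    simpa using PySem.List.sorted_pairwise nums (fun x => x)
  cases hs : PySem.List.sorted nums (fun x => x) false with
  | nil =>
    rw [hs] at hperm
    have : nums = [] := hperm.symm.eq_nil
    simp [this]
  | cons h t =>
    rw [hs] at hpw hfin
    have hht : ∀ y ∈ t, h ≤ y := (List.pairwise_cons.mp hpw).1
    rw [List.foldl_cons]
    have hstep : solutionAltStep (0, none) h = (1, some h) := by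
      simp [solutionAltStep]
    rw [hstep, scan_go t 1 h (List.pairwise_cons.mp hpw).2 hht, ← hfin,
      List.toFinset_cons, card_insert_eq_card_erase_add_one h t.toFinset]
    push_cast
    ring

-- ===== VERDICT (by name: the statement is the Claim_ definition above) =====
theorem solution_spec : Claim_equal_solution := by
  intro nums _
  unfold Spec_solution
  show solution nums = solution_alt nums
  have hA : solution nums =
      (if ((nums.foldl solutionDictStep (PySem.Dict.empty : PySem.Dict Int Int)).size : Int)
          > PySem.Int.floordiv (nums.length : Int) 2
        then PySem.Int.floordiv (nums.length : Int) 2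
        else ((nums.foldl solutionDictStep (PySem.Dict.empty : PySem.Dict Int Int)).size : Int)) :=
    rfl
  have hB : solution_alt nums =
      min ((PySem.List.sorted nums (fun x => x) false).foldl solutionAltStep (0, none)).1
        (PySem.Int.floordiv (nums.length : Int) 2) := rfl
  rw [hA, hB, sizeA nums, distinctB nums, min_def]
  split_ifs <;> omega
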